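-- pv_equiv track=rewrite | github.com/RubinOrlando/generative-midi | generateMidi.py | getNote
-- ===== SOURCE A (Python) =====
-- def getNote( n ):
--     if not n:
--         return "";
--     notes = ["c","c#","d","d#","e","f","f#","g","g#","a","a#","b"];
--     for i in [ 0, 12, 24, 36, 48, 60, 72, 84, 96, 108, 120 ]:
--         if i > n:
--             n = notes[ n - i];
--             return n;
--     return "";
-- ===== SOURCE B (Python) =====
-- def getNote(n):
--     # Closed-form lookup: zero and notes >= 120 map to "", otherwise index by pitch class.
--     if not n or n >= 120:
--         return ""
--     notes = ["c", "c#", "d", "d#", "e", "f", "f#", "g", "g#", "a", "a#", "b"]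
--     return notes[n % 12]
-- ===== Notes on version B (the rewrite author's own statement) =====
-- stated objective: simpler
-- what changed: Replaces the scan over the boundary list [0,12,...,120] (and its negative-index lookup notes[n-i]) with a closed-form pitch-class lookup notes[n % 12] plus the n >= 120 cap.
-- crash fix: For n < -12 A raises IndexError (notes[n] with n < -12), while B returns notes[n % 12], the pitch class of the negative note. — e.g. on getNote(-20): A raises IndexError, B returns "e"
import Mathlib
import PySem

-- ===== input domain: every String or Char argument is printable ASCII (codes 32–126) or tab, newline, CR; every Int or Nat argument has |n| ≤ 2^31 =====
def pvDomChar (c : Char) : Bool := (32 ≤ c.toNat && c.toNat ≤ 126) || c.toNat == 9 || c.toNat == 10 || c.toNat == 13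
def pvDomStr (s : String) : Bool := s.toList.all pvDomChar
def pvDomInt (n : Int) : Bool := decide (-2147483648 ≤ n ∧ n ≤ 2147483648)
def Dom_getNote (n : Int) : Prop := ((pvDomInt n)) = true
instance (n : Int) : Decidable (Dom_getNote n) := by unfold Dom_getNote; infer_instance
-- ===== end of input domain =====

-- B replaces A's boundary-list scan with a closed-form pitch-class lookup (objective: simpler).


-- ===== PORT A =====
def pvNotes : List String := ["c","c#","d","d#","e","f","f#","g","g#","a","a#","b"]

-- the for-loop over the boundary list: first i with i > n returns notes[n-i] (none = IndexError, excluded by Pre_)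
def getNoteLoop (n : Int) : List Int → String
  | [] => ""
  | i :: rest => if i > n then ((PySem.List.pyGet? pvNotes (n - i)).getD "") else getNoteLoop n rest

def getNote (n : Int) : String :=
  if n = 0 then ""
  else getNoteLoop n [0, 12, 24, 36, 48, 60, 72, 84, 96, 108, 120]

-- ===== PORT B =====
def pvNotesB : List String := ["c","c#","d","d#","e","f","f#","g","g#","a","a#","b"]

def getNote_alt (n : Int) : String :=
  if n = 0 ∨ n ≥ 120 then ""
  else (PySem.List.pyGet? pvNotesB (PySem.Int.mod n 12)).getD ""

-- ===== PRECONDITION & SPEC =====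
-- Pre_ excludes n < -12, where A's notes[n] raises IndexError.
def Pre_getNote (n : Int) : Prop := -12 ≤ n
instance (n : Int) : Decidable (Pre_getNote n) := by unfold Pre_getNote; infer_instance
def pvWitness_getNote : Int := (5)

-- For n < -12 A raises IndexError (notes[n] with n < -12), while B returns notes[n % 12].
def Raises_getNote (n : Int) : Prop := n < -12
instance (n : Int) : Decidable (Raises_getNote n) := by unfold Raises_getNote; infer_instance
def pvRaiseWitness_getNote : Int := (-20)
def pvRaiseWitnessOut_getNote : String := "e"

def Spec_getNote (n : Int) (out : String) : Prop := out = getNote_alt n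
instance (n : Int) (out : String) : Decidable (Spec_getNote n out) := by unfold Spec_getNote; infer_instance

-- ===== CLAIM (what is proved, stated in full; the proofs are below) =====
def Claim_equal_getNote : Prop := ∀ (n : Int), Dom_getNote n → Pre_getNote n → Spec_getNote n (getNote n)
def Claim_raises_getNote : Prop := (∀ (n : Int), Dom_getNote n → Raises_getNote n → ¬ Pre_getNote n) ∧ (Dom_getNote (pvRaiseWitness_getNote) ∧ Raises_getNote (pvRaiseWitness_getNote) ∧ getNote_alt (pvRaiseWitness_getNote) = pvRaiseWitnessOut_getNote)

-- ===== LEMMAS AND PROOFS =====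

-- For n ≥ 120 no boundary exceeds n, so A's loop falls through to "".
theorem getNoteLoop_big (n : Int) (h : 120 ≤ n) :
    getNoteLoop n [0, 12, 24, 36, 48, 60, 72, 84, 96, 108, 120] = "" := by
  rw [getNoteLoop, if_neg (by omega), getNoteLoop, if_neg (by omega), getNoteLoop,
    if_neg (by omega), getNoteLoop, if_neg (by omega), getNoteLoop, if_neg (by omega),
    getNoteLoop, if_neg (by omega), getNoteLoop, if_neg (by omega), getNoteLoop,
    if_neg (by omega), getNoteLoop, if_neg (by omega), getNoteLoop, if_neg (by omega),
    getNoteLoop, if_neg (by omega), getNoteLoop]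

-- agreement on the finite band -12 ≤ n < 120
set_option maxHeartbeats 2000000 in
theorem getNote_band (n : Int) (h1 : -12 ≤ n) (h2 : n < 120) :
    getNote n = getNote_alt n := by
  interval_cases n <;> decide

-- ===== VERDICT (by name: the statement is the Claim_ definition above) =====
theorem getNote_spec : Claim_equal_getNote := by
  intro n _ hpre
  unfold Spec_getNote
  by_cases hbig : 120 ≤ n
  · have hz : ¬ n = 0 := by omega
    simp [getNote, getNote_alt, hz, getNoteLoop_big n hbig, hbig]
  · exact getNote_band n hpre (by omega)

@[simp] theorem getNote_raises : Claim_raises_getNote := by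
  unfold Claim_raises_getNote
  exact ⟨by intro n _ hr; unfold Raises_getNote at hr; unfold Pre_getNote; omega, by decide⟩
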